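-- pv_equiv track=rewrite | github.com/dagre/advent-of-code | 2018/solutions/12.py | trim_state
-- ===== SOURCE A (Python) =====
-- def trim_state(state, zero_index):
--     trim_beginning = 0
--     trim_end = 0
--
--     for s in state:
--         if not s:
--             trim_beginning += 1
--         else:
--             break
--
--     for s in range(len(state)-1, 0, -1):
--         if not state[s]:
--             trim_end += 1
--         else:
--             break
--
--     return state[trim_beginning:(len(state) - trim_end)], zero_index - trim_beginning
-- ===== SOURCE B (Python) =====
-- def trim_state(state, zero_index):
--     idx = [i for i, s in enumerate(state) if s]
--     if not idx:
--         return state[:0], zero_index - len(state)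
--     return state[idx[0]:idx[-1] + 1], zero_index - idx[0]
-- ===== Notes on version B (the rewrite author's own statement) =====
-- stated objective: alternative
-- what changed: B builds one index table of truthy positions in a single full pass and derives both trim boundaries from its first and last entries, instead of A's two separate early-break boundary scans (forward, and backward over range(len-1,0,-1)).
import Mathlib
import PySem

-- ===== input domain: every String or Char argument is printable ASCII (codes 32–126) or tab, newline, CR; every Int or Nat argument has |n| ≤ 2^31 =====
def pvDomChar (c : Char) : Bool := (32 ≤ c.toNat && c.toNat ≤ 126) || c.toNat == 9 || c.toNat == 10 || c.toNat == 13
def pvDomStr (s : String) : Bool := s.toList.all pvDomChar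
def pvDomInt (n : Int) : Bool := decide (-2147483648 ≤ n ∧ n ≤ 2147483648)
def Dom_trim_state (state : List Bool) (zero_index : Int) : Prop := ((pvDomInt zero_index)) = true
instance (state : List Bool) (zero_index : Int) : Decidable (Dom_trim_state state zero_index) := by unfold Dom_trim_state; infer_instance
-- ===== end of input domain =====

-- B replaces A's two early-break boundary scans by one full pass building the list of
-- truthy indices, reading both boundaries off its first and last entries (objective: alternative).

-- ===== PORT A =====
-- first loop: count leading falsy elements, break at the first truthy one
def trimBegA : List Bool → Int
  | [] => 0
  | s :: rest => if !s then trimBegA rest + 1 else 0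

-- second loop: 'for s in range(len(state)-1, 0, -1)'; the argument is the current index
-- (the range visits len-1, len-2, …, 1 and stops before 0); the 'none' branch is
-- unreachable since every visited index is in bounds.
def trimEndA (state : List Bool) : Nat → Int
  | 0 => 0
  | i + 1 =>
    match PySem.List.pyGet? state ((i : Int) + 1) with
    | some s => if !s then trimEndA state i + 1 else 0
    | none => 0

def trim_state (state : List Bool) (zero_index : Int) : List Bool × Int :=
  let trim_beginning := trimBegA state
  let trim_end := trimEndA state (state.length - 1)
  (PySem.List.slice state (some trim_beginning) (some ((state.length : Int) - trim_end)),
   zero_index - trim_beginning)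

-- ===== PORT B =====
def trim_state_alt (state : List Bool) (zero_index : Int) : List Bool × Int :=
  let idx := (List.range state.length).filter (fun i => state.getD i false)
  if idx.isEmpty then
    (PySem.List.slice state none (some 0), zero_index - state.length)
  else
    (PySem.List.slice state (some ((idx.headD 0 : Nat) : Int)) (some (((idx.getLastD 0 : Nat) : Int) + 1)),
     zero_index - ((idx.headD 0 : Nat) : Int))

-- ===== PRECONDITION & SPEC =====
def Spec_trim_state (state : List Bool) (zero_index : Int) (out : List Bool × Int) : Prop := out = trim_state_alt state zero_index
instance (state : List Bool) (zero_index : Int) (out : List Bool × Int) : Decidable (Spec_trim_state state zero_index out) := by unfold Spec_trim_state; infer_instance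

-- ===== CLAIM (what is proved, stated in full; the proofs are below) =====
def Claim_equal_trim_state : Prop := ∀ (state : List Bool) (zero_index : Int), Dom_trim_state state zero_index → Spec_trim_state state zero_index (trim_state state zero_index)

-- ===== LEMMAS AND PROOFS =====

theorem getD_false_of_not_mem (s : List Bool) (h : ¬ true ∈ s) (j : Nat) :
    s.getD j false = false := by
  induction s generalizing j with
  | nil => simp [List.getD]
  | cons b rest ih =>
    cases j with
    | zero =>
      cases b
      · rfl
      · exact absurd (by simp) h
    | succ j => simpa [List.getD] using ih (fun hm => h (by simp [hm])) j

theorem trimBegA_all_false (s : List Bool) (h : ¬ true ∈ s) :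
    trimBegA s = (s.length : Int) := by
  induction s with
  | nil => simp [trimBegA]
  | cons b rest ih =>
    cases b
    · simp [trimBegA, ih (fun hm => h (by simp [hm]))]
    · exact absurd (by simp) h

theorem trimBegA_eq_idxOf (s : List Bool) (h : true ∈ s) :
    trimBegA s = (s.idxOf true : Int) := by
  induction s with
  | nil => cases h
  | cons b rest ih =>
    cases b
    · have hm : true ∈ rest := by simpa using h
      simp [trimBegA, ih hm]
    · simp [trimBegA]

theorem idxOf_getD (s : List Bool) (h : true ∈ s) :
    s.getD (s.idxOf true) false = true := by
  induction s with
  | nil => cases h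
  | cons b rest ih =>
    cases b
    · have hm : true ∈ rest := by simpa using h
      simpa [List.getD] using ih hm
    · simp [List.getD]

theorem idxOf_min (s : List Bool) (j : Nat) (hj : j < s.idxOf true) :
    s.getD j false = false := by
  induction s generalizing j with
  | nil => simp [List.getD]
  | cons b rest ih =>
    cases b
    · cases j with
      | zero => rfl
      | succ j =>
        simp at hj
        simpa [List.getD] using ih j (by omega)
    · simp at hj

theorem getD_reverse (s : List Bool) (j : Nat) (hj : j < s.length) :
    s.reverse.getD j false = s.getD (s.length - 1 - j) false := by
  rw [List.getD_eq_getElem _ false (by simpa using hj),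
      List.getD_eq_getElem _ false (by omega)]
  simp [List.getElem_reverse]

theorem trimEndA_all_false (s : List Bool) (h : ¬ true ∈ s) (i : Nat) (hi : i < s.length) :
    trimEndA s i = (i : Int) := by
  induction i with
  | zero => simp [trimEndA]
  | succ i ih =>
    have hget : PySem.List.pyGet? s ((i : Int) + 1) = some false := by
      have : ((i : Int) + 1) = ((i + 1 : Nat) : Int) := by push_cast; ring
      rw [this, PySem.List.pyGet?_natCast]
      have hbv := getD_false_of_not_mem s h (i + 1)
      rw [List.getD_eq_getElem s false hi] at hbv
      simp [List.getElem?_eq_getElem hi, hbv]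
    simp [trimEndA, hget, ih (by omega)]

theorem trimEndA_count (s : List Bool) (l : Nat)
    (hl : s.getD l false = true)
    (hmax : ∀ j, l < j → j < s.length → s.getD j false = false) :
    ∀ i, l ≤ i → i < s.length → trimEndA s i = (i : Int) - l := by
  intro i
  induction i with
  | zero => intro h1 _; simp [trimEndA]; omega
  | succ i ih =>
    intro h1 h2
    have hcast : ((i : Int) + 1) = ((i + 1 : Nat) : Int) := by push_cast; ring
    by_cases he : l = i + 1
    · have hl' : s[i + 1] = true := by
        have hc := hl
        rw [he] at hc
        rwa [List.getD_eq_getElem s false h2] at hc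
      have hget : PySem.List.pyGet? s ((i : Int) + 1) = some true := by
        rw [hcast, PySem.List.pyGet?_natCast]
        simp [List.getElem?_eq_getElem h2, hl']
      simp [trimEndA, hget]
      omega
    · have hlt : l < i + 1 := by omega
      have hbv := hmax (i + 1) hlt h2
      rw [List.getD_eq_getElem s false h2] at hbv
      have hget : PySem.List.pyGet? s ((i : Int) + 1) = some false := by
        rw [hcast, PySem.List.pyGet?_natCast]
        simp [List.getElem?_eq_getElem h2, hbv]
      simp [trimEndA, hget, ih (by omega) (by omega)]
      omega

theorem filter_range_head (p : Nat → Bool) (f : Nat) (hmin : ∀ j, j < f → p j = false)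
    (hp : p f = true) : ∀ n, f < n → ((List.range n).filter p).head? = some f := by
  intro n
  induction n with
  | zero => omega
  | succ n ih =>
    intro hf
    rw [List.range_succ, List.filter_append]
    by_cases hfn : f < n
    · rw [List.head?_append_of_ne_nil]
      · exact ih hfn
      · intro hnil
        have : f ∈ (List.range n).filter p := by
          simp [List.mem_filter, List.mem_range, hfn, hp]
        simp [hnil] at this
    · have hfe : f = n := by omega
      have hnil : (List.range n).filter p = [] := by
        apply List.filter_eq_nil_iff.mpr
        intro j hj
        simp only [List.mem_range] at hj
        simp [hmin j (by omega)]
      subst hfe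
      simp [hnil, List.filter, hp]

theorem filter_range_last (p : Nat → Bool) (l : Nat) (hp : p l = true)
    (hmax : ∀ j, l < j → p j = false) :
    ∀ n, l < n → ((List.range n).filter p).getLast? = some l := by
  intro n
  induction n with
  | zero => omega
  | succ n ih =>
    intro hl
    rw [List.range_succ, List.filter_append]
    by_cases hln : l < n
    · have hfn : p n = false := hmax n hln
      simp [List.filter, hfn, ih hln]
    · have hle : l = n := by omega
      subst hle
      simp [List.filter, hp]

theorem filter_range_ne_nil (s : List Bool) (h : true ∈ s) :
    (List.range s.length).filter (fun i => s.getD i false) ≠ [] := by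
  intro hnil
  have hf : s.idxOf true ∈ (List.range s.length).filter (fun i => s.getD i false) :=
    List.mem_filter.mpr ⟨List.mem_range.mpr (List.idxOf_lt_length_of_mem h), idxOf_getD s h⟩
  rw [hnil] at hf
  exact absurd hf (List.not_mem_nil)

-- ===== VERDICT (by name: the statement is the Claim_ definition above) =====
theorem trim_state_spec : Claim_equal_trim_state := by
  intro state zero_index _
  unfold Spec_trim_state trim_state trim_state_alt
  by_cases h : true ∈ state
  · -- some truthy element: first truthy index f, last truthy index n-1-r
    have hn : 0 < state.length := List.length_pos_of_mem h
    set n := state.length with hnd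
    set f := state.idxOf true with hfd
    have hfn : f < n := List.idxOf_lt_length_of_mem h
    have hrev : true ∈ state.reverse := by simpa using h
    set r := state.reverse.idxOf true with hrd
    have hrn : r < n := by simpa using List.idxOf_lt_length_of_mem hrev
    set l := n - 1 - r with hld
    have hln : l < n := by omega
    have hgl : state.getD l false = true := by
      have hval := idxOf_getD state.reverse hrev
      rw [getD_reverse state r hrn] at hval
      exact hval
    have hmax : ∀ j, l < j → j < n → state.getD j false = false := by
      intro j hlj hjn
      have hj' : n - 1 - j < r := by omega
      have hval := idxOf_min state.reverse (n - 1 - j) hj'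
      rw [getD_reverse state (n - 1 - j) (by omega)] at hval
      have he : state.length - 1 - (n - 1 - j) = j := by omega
      rwa [he] at hval
    have hfl : f ≤ l := by
      by_contra hc
      have := hmax f (by omega) hfn
      rw [idxOf_getD state h] at this
      exact absurd this (by simp)
    -- A's two loop results
    have hbeg : trimBegA state = (f : Int) := trimBegA_eq_idxOf state h
    have hend : trimEndA state (n - 1) = ((n : Int) - 1) - l := by
      have := trimEndA_count state l hgl hmax (n - 1) (by omega) (by omega)
      rw [this]; omega
    -- B's index list
    set idx := (List.range n).filter (fun i => state.getD i false) with hidxd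
    have hne : idx ≠ [] := filter_range_ne_nil state h
    have hhead : idx.head? = some f :=
      filter_range_head _ f (fun j hj => idxOf_min state j hj) (idxOf_getD state h) n hfn
    have hlast : idx.getLast? = some l := by
      apply filter_range_last _ l hgl _ n hln
      intro j hlj
      by_cases hjn : j < n
      · exact hmax j hlj hjn
      · exact List.getD_eq_default _ _ (by omega)
    have hheadD : idx.headD 0 = f := by
      rw [List.headD_eq_head?_getD, hhead]
      rfl
    have hlastD : idx.getLastD 0 = l := by
      rw [List.getLastD_eq_getLast?, hlast]; rfl
    have hempty : idx.isEmpty = false := by simpa [List.isEmpty_iff] using hne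
    simp only [hempty, Bool.false_eq_true, if_false, hbeg, hend, hheadD, hlastD, Prod.mk.injEq]
    constructor
    · have hb : (n : Int) - ((n : Int) - 1 - l) = ((l + 1 : Nat) : Int) := by push_cast; omega
      rw [hb]
      have hf' : (f : Int) = ((f : Nat) : Int) := rfl
      rw [PySem.List.slice_natCast]
      have hl1 : ((l : Int) + 1) = ((l + 1 : Nat) : Int) := by push_cast; ring
      rw [hl1, PySem.List.slice_natCast]
    · trivial
  · -- all falsy (possibly empty): both return ([], z - n)
    have hbeg : trimBegA state = (state.length : Int) := trimBegA_all_false state h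
    have hidx : (List.range state.length).filter (fun i => state.getD i false) = [] := by
      apply List.filter_eq_nil_iff.mpr
      intro j _
      have hg := getD_false_of_not_mem state h j
      simp [List.getD] at hg
      simp [hg]
    rcases Nat.eq_zero_or_pos state.length with h0 | hpos
    · have hs : state = [] := List.eq_nil_of_length_eq_zero h0
      subst hs
      simp [trimBegA, trimEndA, PySem.List.slice]
    · have hend : trimEndA state (state.length - 1) = (state.length : Int) - 1 := by
        have hv := trimEndA_all_false state h (state.length - 1) (by omega)
        rw [hv]
        omega
      have hb : (state.length : Int) - ((state.length : Int) - 1) = ((1 : Nat) : Int) := by omega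
      simp only [hidx, List.isEmpty_nil, hbeg, hend, hb, if_true, Prod.mk.injEq]
      constructor
      · have hn' : (state.length : Int) = ((state.length : Nat) : Int) := rfl
        rw [PySem.List.slice_natCast]
        have h0' : (0 : Int) = ((0 : Nat) : Int) := rfl
        rw [h0', PySem.List.slice_to_natCast]
        simp
      · trivial
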